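-- pv_equiv track=rewrite | github.com/MrBrantCode/unitest_baseline | mut_generate/mist_train_taco/taco_13383/solution.py | restore_pancake_orientation
-- ===== SOURCE A (Python) =====
-- def restore_pancake_orientation(n, m, transformations):
--     sgn = 1
--     rot = 0
--
--     for (t, k) in transformations:
--         t = 3 - 2 * t
--         sgn *= t
--         rot = k + t * rot
--
--     return (3 - sgn) // 2, -sgn * rot % n
-- ===== SOURCE B (Python) =====
-- def restore_pancake_orientation(n, m, transformations):
--     # Two staged passes with an explicit suffix-product table: expand the Horner
--     # recurrence into rot = sum_i k_i * suffix[i+1], where suffix[i] is the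
--     # product of converted signs (3 - 2*t) over transformations[i:].
--     L = len(transformations)
--     suffix = [1] * (L + 1)
--     for i in range(L - 1, -1, -1):
--         suffix[i] = (3 - 2 * transformations[i][0]) * suffix[i + 1]
--     total = sum(k * suffix[i + 1] for i, (t, k) in enumerate(transformations))
--     return (3 - suffix[0]) // 2, -suffix[0] * total % n
-- ===== Notes on version B (the rewrite author's own statement) =====
-- stated objective: alternative
-- what changed: Replaces A's single interleaved multiply-add Horner fold over (sgn, rot) with a staged algorithm: first materialise a suffix-product table of converted signs, then take the weighted sum total = sum_i k_i * suffix[i+1] (the closed-sum expansion of the recurrence); the final sign is suffix[0].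
import Mathlib
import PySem

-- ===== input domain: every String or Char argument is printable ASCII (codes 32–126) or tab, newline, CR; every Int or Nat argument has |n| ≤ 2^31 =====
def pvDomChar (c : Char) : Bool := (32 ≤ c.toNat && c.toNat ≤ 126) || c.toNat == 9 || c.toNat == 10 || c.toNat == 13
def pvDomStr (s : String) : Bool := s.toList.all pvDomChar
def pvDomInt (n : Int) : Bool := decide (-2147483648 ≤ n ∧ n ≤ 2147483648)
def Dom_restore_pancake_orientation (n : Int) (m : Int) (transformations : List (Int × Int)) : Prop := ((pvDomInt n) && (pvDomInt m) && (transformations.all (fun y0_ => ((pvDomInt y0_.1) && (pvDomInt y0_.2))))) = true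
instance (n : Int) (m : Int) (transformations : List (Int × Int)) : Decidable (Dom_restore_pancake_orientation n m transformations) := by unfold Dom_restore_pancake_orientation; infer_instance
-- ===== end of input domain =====

-- B replaces A's single interleaved Horner fold over (sgn, rot) with two staged passes:
-- a suffix-product table of converted signs, then a weighted sum (alternative, same cost).

-- ===== PORT A =====
def restore_pancake_orientation (n : Int) (m : Int) (transformations : List (Int × Int)) : Int × Int :=
  let st := transformations.foldl
    (fun (sr : Int × Int) (tk : Int × Int) =>
      let t := 3 - 2 * tk.1
      (sr.1 * t, tk.2 + t * sr.2)) (1, 0)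
  (PySem.Int.floordiv (3 - st.1) 2, PySem.Int.mod (-st.1 * st.2) n)

-- ===== PORT B =====
-- the suffix-product table: suffix[i] = (3 - 2*t_i) * suffix[i+1], suffix[L] = 1
def pancakeSuffix : List (Int × Int) → List Int
  | [] => [1]
  | tk :: rest =>
      let s := pancakeSuffix rest
      ((3 - 2 * tk.1) * s.headI) :: s

def restore_pancake_orientation_alt (n : Int) (m : Int) (transformations : List (Int × Int)) : Int × Int :=
  let suffix := pancakeSuffix transformations
  let total := (transformations.zip suffix.tail).foldl
    (fun (acc : Int) (p : (Int × Int) × Int) => acc + p.1.2 * p.2) 0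
  (PySem.Int.floordiv (3 - suffix.headI) 2, PySem.Int.mod (-suffix.headI * total) n)

-- ===== PRECONDITION & SPEC =====
-- Pre_ excludes n = 0, where Python's `% n` raises ZeroDivisionError in both A and B.
def Pre_restore_pancake_orientation (n : Int) (m : Int) (transformations : List (Int × Int)) : Prop := n ≠ 0
instance (n : Int) (m : Int) (transformations : List (Int × Int)) : Decidable (Pre_restore_pancake_orientation n m transformations) := by unfold Pre_restore_pancake_orientation; infer_instance
def pvWitness_restore_pancake_orientation : Int × Int × (List (Int × Int)) := (5, 0, [(1, 2), (2, 3)])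

def Spec_restore_pancake_orientation (n : Int) (m : Int) (transformations : List (Int × Int)) (out : Int × Int) : Prop := out = restore_pancake_orientation_alt n m transformations
instance (n : Int) (m : Int) (transformations : List (Int × Int)) (out : Int × Int) : Decidable (Spec_restore_pancake_orientation n m transformations out) := by unfold Spec_restore_pancake_orientation; infer_instance

-- ===== CLAIM (what is proved, stated in full; the proofs are below) =====
def Claim_equal_restore_pancake_orientation : Prop := ∀ (n : Int) (m : Int) (transformations : List (Int × Int)), Dom_restore_pancake_orientation n m transformations → Pre_restore_pancake_orientation n m transformations → Spec_restore_pancake_orientation n m transformations (restore_pancake_orientation n m transformations)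

-- ===== LEMMAS AND PROOFS =====

theorem pancakeSuffix_ne_nil (l : List (Int × Int)) : pancakeSuffix l ≠ [] := by
  cases l <;> simp [pancakeSuffix]

-- shifting the initial accumulator out of B's summing fold
theorem pancake_sum_shift (l : List ((Int × Int) × Int)) (c : Int) :
    l.foldl (fun (acc : Int) (p : (Int × Int) × Int) => acc + p.1.2 * p.2) c
    = c + l.foldl (fun (acc : Int) (p : (Int × Int) × Int) => acc + p.1.2 * p.2) 0 := by
  induction l generalizing c with
  | nil => simp
  | cons x l ih => simp only [List.foldl_cons]; rw [ih, ih (0 + _)]; ring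

-- A's Horner fold from any start state, expressed through B's suffix table and weighted sum.
theorem pancake_fold_eq (l : List (Int × Int)) (s r : Int) :
    l.foldl (fun (sr : Int × Int) (tk : Int × Int) =>
        (sr.1 * (3 - 2 * tk.1), tk.2 + (3 - 2 * tk.1) * sr.2)) (s, r)
    = (s * (pancakeSuffix l).headI,
       (l.zip (pancakeSuffix l).tail).foldl
         (fun (acc : Int) (p : (Int × Int) × Int) => acc + p.1.2 * p.2) 0
       + (pancakeSuffix l).headI * r) := by
  induction l generalizing s r with
  | nil => simp [pancakeSuffix]
  | cons x l ih =>
    simp only [List.foldl_cons, pancakeSuffix]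
    rw [ih]
    obtain ⟨z, zs, hz⟩ : ∃ z zs, pancakeSuffix l = z :: zs := by
      cases h : pancakeSuffix l with
      | nil => exact absurd h (pancakeSuffix_ne_nil l)
      | cons z zs => exact ⟨z, zs, rfl⟩
    simp only [hz, List.headI, List.tail_cons, List.zip_cons_cons, List.foldl_cons]
    refine Prod.ext (by dsimp only; ring) ?_
    dsimp only
    rw [pancake_sum_shift (l.zip zs) (0 + x.2 * z)]
    ring

-- ===== VERDICT (by name: the statement is the Claim_ definition above) =====
theorem restore_pancake_orientation_spec : Claim_equal_restore_pancake_orientation := by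
  intro n m ts _ _
  unfold Spec_restore_pancake_orientation restore_pancake_orientation restore_pancake_orientation_alt
  simp only
  rw [pancake_fold_eq ts 1 0]
  norm_num
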